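-- pv_equiv track=rewrite | github.com/Ejdamiik/tetris | hw3.py | eval_score
-- ===== SOURCE A (Python) =====
-- from typing import List, Tuple
--
-- Arena = List[List[bool]]
--
-- def is_occupied(arena: Arena, x: int, y: int) -> bool:
--
--     if 0 > y or y > len(arena) - 1:
--         return True
--
--     if 0 > x or x > len(arena[0]) - 1:
--         return True
--
--     # coords in reversed order bcs of matrix coords work reversed
--     return arena[y][x]
--
-- def set_occupied(arena: Arena, x: int, y: int, occupied: bool) -> None:
--
--     arena[y][x] = occupied
--
-- def eval_score(arena: Arena, score: int) -> int:
--
--     filled = 0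
--     first_filled = None
--
--     for row_i in range(len(arena)):
--
--         if False not in arena[row_i]:
--
--             if filled == 0:
--                 first_filled = row_i
--
--             filled += 1
--             last_filled = row_i
--             clear_row(arena, row_i)
--
--     score += filled ** 2
--
--     if first_filled:
--         move_rows(arena, first_filled - 1, last_filled)
--     return score
--
-- def move_rows(
--         arena: Arena, last_row_to_move: int, last_able_row: int
--         ) -> None:
--
--     for row_i in range(last_row_to_move, -1, -1):
--
--         for column_i in range(len(arena[0])):
--
--             x = column_i
--             y = row_i
--
--             occupation_status = is_occupied(arena, x, y)
--             set_occupied(arena, x, y, False)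
--
--             while not is_occupied(arena, x, y) and y <= last_able_row:
--                 y += 1
--
--             set_occupied(arena, x, y - 1, occupation_status)
--
-- def clear_row(arena: Arena, row_i: int) -> None:
--
--     for col in range(len(arena[0])):
--
--         set_occupied(arena, col, row_i, False)
-- ===== SOURCE B (Python) =====
-- def eval_score(arena, score):
--     # Return-value re-implementation: one pass counting full rows; it does NOT
--     # mutate arena (A clears rows and applies gravity in place).
--     full = sum(1 for row in arena if all(row))
--     return score + full * full
-- ===== Notes on version B (the rewrite author's own statement) =====
-- stated objective: simpler
-- what changed: B computes the returned score directly as score + (count of full rows)^2 in a single counting pass, without simulating A's in-place row clearing and per-cell downward gravity rescans (A's worst case is O(rows^2*cols) when rows are cleared); side effects on arena are not reproduced - the equivalence is about the return value.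
-- outside the precondition, e.g. on eval_score([[True, True], [False], [True, True]], 0): A returns 4, B returns 4; on eval_score([[True, False], [True]], 0): A raises IndexError, B returns 1
import Mathlib
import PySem

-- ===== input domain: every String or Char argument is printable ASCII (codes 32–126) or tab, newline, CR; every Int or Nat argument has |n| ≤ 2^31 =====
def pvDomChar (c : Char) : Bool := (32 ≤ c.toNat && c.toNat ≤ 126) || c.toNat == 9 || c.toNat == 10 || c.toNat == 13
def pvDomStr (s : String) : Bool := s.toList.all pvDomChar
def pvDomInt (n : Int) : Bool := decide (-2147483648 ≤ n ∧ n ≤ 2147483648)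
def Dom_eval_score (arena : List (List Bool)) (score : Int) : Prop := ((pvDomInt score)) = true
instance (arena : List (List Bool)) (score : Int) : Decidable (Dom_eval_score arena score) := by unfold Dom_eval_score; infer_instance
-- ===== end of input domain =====

-- B replaces A's in-place clearing + per-cell gravity simulation by a single pass
-- counting full rows (return value only: A mutates arena in place, B does not).

-- ===== PORT A =====
-- set_occupied: arena[y][x] = b.  Under Pre_ every call has 0 ≤ y < len(arena) and
-- 0 ≤ x < len(arena[y]), where List.set/toNat are exact.
def setOccA (ar : List (List Bool)) (x y : Int) (b : Bool) : List (List Bool) :=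
  ar.set y.toNat ((ar.getD y.toNat []).set x.toNat b)

-- is_occupied: bounds-checked read; reads in range under Pre_, where getD is exact.
def isOccA (ar : List (List Bool)) (x y : Int) : Bool :=
  if 0 > y || y > (ar.length : Int) - 1 then true
  else if 0 > x || x > ((ar.headD []).length : Int) - 1 then true
  else (ar.getD y.toNat []).getD x.toNat false

-- clear_row
def clearRowA (ar : List (List Bool)) (rowI : Int) : List (List Bool) :=
  (List.range (ar.headD []).length).foldl (fun a (col : Nat) => setOccA a (col : Int) rowI false) ar

-- the 'while not is_occupied … : y += 1' loop of move_rows; the fuel bound only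
-- makes it total (the loop stops at y = lastAble + 1 at the latest).
def bumpA (ar : List (List Bool)) (x : Int) (y lastAble : Int) (fuel : Nat) : Int :=
  match fuel with
  | 0 => y
  | Nat.succ f =>
      if !(isOccA ar x y) && decide (y ≤ lastAble) then bumpA ar x (y + 1) lastAble f else y

-- move_rows
def moveRowsA (ar : List (List Bool)) (lastRowToMove lastAble : Int) : List (List Bool) :=
  (PySem.List.pyRange lastRowToMove (-1) (-1)).foldl (fun a rowI =>
    (List.range (a.headD []).length).foldl (fun a2 (colI : Nat) =>
      let x : Int := (colI : Int)
      let occ := isOccA a2 x rowI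
      let a3 := setOccA a2 x rowI false
      let y := bumpA a3 x rowI lastAble ((lastAble - rowI).toNat + 2)
      setOccA a3 x (y - 1) occ) a) ar

def eval_score (arena : List (List Bool)) (score : Int) : Int :=
  -- state: (arena, filled, first_filled, last_filled)
  let st := (List.range arena.length).foldl
    (fun (s : List (List Bool) × Int × Option Int × Int) rowI =>
      if !((s.1.getD rowI []).contains false) then
        let ff := if s.2.1 = 0 then some (rowI : Int) else s.2.2.1
        (clearRowA s.1 (rowI : Int), s.2.1 + 1, ff, (rowI : Int))
      else s)
    (arena, 0, none, 0)
  let score2 := score + st.2.1 ^ 2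
  -- 'if first_filled:' — Python truthiness: None and 0 are falsy
  let _arena2 :=
    match st.2.2.1 with
    | some ff => if ff ≠ 0 then moveRowsA st.1 (ff - 1) st.2.2.2 else st.1
    | none => st.1
  score2

-- ===== PORT B =====
def eval_score_alt (arena : List (List Bool)) (score : Int) : Int :=
  let full : Int := (arena.countP (fun row => row.all (fun b => b)) : Nat)
  score + full * full

-- ===== PRECONDITION & SPEC =====
-- Pre_ excludes ragged arenas that contain a fully-occupied row: there A's
-- index-based row clearing and gravity write past the end of shorter rows and
-- raise IndexError on most such arenas (on the few where A still returns, its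
-- value agrees with B's).
def Pre_eval_score (arena : List (List Bool)) (score : Int) : Prop :=
  (∀ row ∈ arena, false ∈ row) ∨ (∀ row ∈ arena, (arena.headD []).length ≤ row.length)
instance (arena : List (List Bool)) (score : Int) : Decidable (Pre_eval_score arena score) := by
  unfold Pre_eval_score; infer_instance

def pvWitness_eval_score : List (List Bool) × Int := ([[true, false], [true, true]], 3)

def Spec_eval_score (arena : List (List Bool)) (score : Int) (out : Int) : Prop := out = eval_score_alt arena score
instance (arena : List (List Bool)) (score : Int) (out : Int) : Decidable (Spec_eval_score arena score out) := by unfold Spec_eval_score; infer_instance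

-- ===== CLAIM (what is proved, stated in full; the proofs are below) =====
def Claim_equal_eval_score : Prop := ∀ (arena : List (List Bool)) (score : Int), Dom_eval_score arena score → Pre_eval_score arena score → Spec_eval_score arena score (eval_score arena score)

-- ===== LEMMAS AND PROOFS =====

-- 'False not in row' is Python's way of saying the row is all-True.
theorem notContains_eq_all (r : List Bool) : (!(r.contains false)) = r.all (fun b => b) := by
  induction r with
  | nil => rfl
  | cons b t ih => cases b <;> simp_all

theorem setOccA_getD_ne (ar : List (List Bool)) (x y : Int) (b : Bool) (j : Nat)
    (h : j ≠ y.toNat) : (setOccA ar x y b).getD j [] = ar.getD j [] := by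
  simp [setOccA, List.getD, List.getElem?_set_ne (Ne.symm h)]

theorem clearRowA_getD_ne (ar : List (List Bool)) (rowI : Int) (j : Nat)
    (h : j ≠ rowI.toNat) : (clearRowA ar rowI).getD j [] = ar.getD j [] := by
  unfold clearRowA
  generalize List.range (ar.headD []).length = l
  induction l generalizing ar with
  | nil => rfl
  | cons c t ih =>
      rw [List.foldl_cons, ih (setOccA ar (c : Int) rowI false),
        setOccA_getD_ne _ _ _ _ _ h]

-- invariant of A's main loop: the 'filled' counter counts the full rows of the
-- ORIGINAL arena among the indices still to be processed (clear_row only touches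
-- the already-processed row).
theorem mainLoop_filled (arena0 : List (List Bool)) :
    ∀ (l : List Nat), l.Nodup →
    ∀ (ar : List (List Bool)) (f : Int) (ff : Option Int) (lf : Int),
    (∀ i ∈ l, ar.getD i [] = arena0.getD i []) →
    (l.foldl
      (fun (s : List (List Bool) × Int × Option Int × Int) rowI =>
        if !((s.1.getD rowI []).contains false) then
          let ffn := if s.2.1 = 0 then some (rowI : Int) else s.2.2.1
          (clearRowA s.1 (rowI : Int), s.2.1 + 1, ffn, (rowI : Int))
        else s)
      (ar, f, ff, lf)).2.1
      = f + (l.countP (fun i => (arena0.getD i []).all (fun b => b)) : Nat) := by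
  intro l
  induction l with
  | nil => intro _ ar f ff lf _; simp
  | cons i t ih =>
    intro hnd ar f ff lf hag
    have hit : i ∉ t := (List.nodup_cons.mp hnd).1
    have hndt : t.Nodup := (List.nodup_cons.mp hnd).2
    have hi : ar.getD i [] = arena0.getD i [] := hag i (List.mem_cons_self ..)
    have hcond : (!((ar.getD i []).contains false)) = (arena0.getD i []).all (fun b => b) := by
      rw [hi, notContains_eq_all]
    simp only [List.foldl_cons]
    by_cases hfull : (arena0.getD i []).all (fun b => b) = true
    · rw [if_pos (by rw [hcond]; exact hfull)]
      have hag' : ∀ j ∈ t, (clearRowA ar (i : Int)).getD j [] = arena0.getD j [] := by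
        intro j hj
        rw [clearRowA_getD_ne _ _ _ (by simpa using fun h : j = i => hit (h ▸ hj))]
        exact hag j (List.mem_cons_of_mem _ hj)
      rw [ih hndt _ _ _ _ hag', List.countP_cons, if_pos hfull]
      push_cast
      ring
    · rw [if_neg (by rw [hcond]; simpa using hfull)]
      have hag' : ∀ j ∈ t, ar.getD j [] = arena0.getD j [] :=
        fun j hj => hag j (List.mem_cons_of_mem _ hj)
      rw [ih hndt _ _ _ _ hag', List.countP_cons, if_neg hfull]
      push_cast
      ring

theorem countP_range_getD :
    ∀ (ar : List (List Bool)),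
    (List.range ar.length).countP (fun i => (ar.getD i []).all (fun b => b))
      = ar.countP (fun row => row.all (fun b => b)) := by
  intro ar
  induction ar with
  | nil => simp
  | cons a t ih =>
    rw [List.length_cons, List.range_succ_eq_map, List.countP_cons, List.countP_map]
    have hc : ((fun i => ((a :: t).getD i []).all (fun b => b)) ∘ Nat.succ)
        = (fun i => (t.getD i []).all (fun b => b)) := by
      funext i; simp [List.getD]
    rw [hc, ih, List.countP_cons]
    simp [List.getD]

theorem eval_score_eq (arena : List (List Bool)) (score : Int) :
    eval_score arena score = eval_score_alt arena score := by
  unfold eval_score eval_score_alt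
  have h := mainLoop_filled arena (List.range arena.length) (List.nodup_range)
    arena 0 none 0 (fun _ _ => rfl)
  simp only [] at h ⊢
  rw [h, countP_range_getD]
  ring

-- ===== VERDICT (by name: the statement is the Claim_ definition above) =====
theorem eval_score_spec : Claim_equal_eval_score := by
  intro arena score _ _
  exact eval_score_eq arena score
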